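-- pv_equiv track=rewrite | github.com/MrIDK-crypto/2ndBRAINPRANAV | backend/services/lab_profile_service.py | _estimate_journal_tier
-- ===== SOURCE A (Python) =====
-- def _estimate_journal_tier(journal_name: str) -> int:
--     """Estimate impact tier from journal name."""
--     journal_lower = journal_name.lower()
--
--     # Tier 1: Top journals
--     tier1 = ['nature', 'science', 'cell', 'nejm', 'lancet', 'jama']
--     if any(j in journal_lower for j in tier1):
--         return 1
--
--     # Tier 2: High-impact specialty
--     tier2 = ['nature communications', 'cell reports', 'pnas', 'plos biology',
--              'elife', 'current biology', 'molecular cell', 'neuron']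
--     if any(j in journal_lower for j in tier2):
--         return 2
--
--     # Tier 3: Good specialty journals
--     tier3 = ['plos one', 'scientific reports', 'frontiers', 'bmc',
--              'journal of biological chemistry', 'biochemistry']
--     if any(j in journal_lower for j in tier3):
--         return 3
--
--     # Default to Tier 3
--     return 3
-- ===== SOURCE B (Python) =====
-- KEYWORDS = [
--     ('nature', 1), ('science', 1), ('cell', 1), ('nejm', 1), ('lancet', 1), ('jama', 1),
--     ('nature communications', 2), ('cell reports', 2), ('pnas', 2), ('plos biology', 2),
--     ('elife', 2), ('current biology', 2), ('molecular cell', 2), ('neuron', 2),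
--     ('plos one', 3), ('scientific reports', 3), ('frontiers', 3), ('bmc', 3),
--     ('journal of biological chemistry', 3), ('biochemistry', 3),
-- ]
--
-- def _estimate_journal_tier(journal_name: str) -> int:
--     """Best (smallest) tier among all matching keywords; 3 if nothing matches.
--
--     Correct vs. the ordered-check version because tier values are 1 < 2 < 3,
--     so the minimum matching tier equals the first tier group that matches."""
--     jl = journal_name.lower()
--     matched = [t for s, t in KEYWORDS if s in jl]
--     return min(matched) if matched else 3
-- ===== Notes on version B (the rewrite author's own statement) =====
-- stated objective: alternative
-- what changed: B replaces A's three ordered early-return any() checks with a single flat (keyword, tier) table: it collects the tiers of ALL matching keywords and returns their minimum, defaulting to 3 -- a min-aggregation over one pass instead of staged guarded returns; equal because tier values 1<2<3 match the check order.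
import Mathlib
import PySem

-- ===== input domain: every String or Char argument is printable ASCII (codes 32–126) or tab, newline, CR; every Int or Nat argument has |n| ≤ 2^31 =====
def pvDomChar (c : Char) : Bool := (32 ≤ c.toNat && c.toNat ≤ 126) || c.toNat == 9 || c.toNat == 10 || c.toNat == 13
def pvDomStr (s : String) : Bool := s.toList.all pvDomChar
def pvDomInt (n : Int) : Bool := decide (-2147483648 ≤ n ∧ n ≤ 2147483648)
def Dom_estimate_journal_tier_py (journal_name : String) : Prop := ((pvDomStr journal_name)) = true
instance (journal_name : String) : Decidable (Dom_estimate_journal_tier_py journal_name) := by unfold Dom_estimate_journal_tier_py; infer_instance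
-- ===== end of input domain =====

-- B replaces A's three ordered early-return any() checks by one flat (keyword, tier) table,
-- returning the minimum tier among all matches (default 3); equal because tiers are 1 < 2 < 3.

-- ===== PORT A =====
def estimate_journal_tier_py (journal_name : String) : Int :=
  let journal_lower := PySem.Str.lower journal_name
  let tier1 := ["nature", "science", "cell", "nejm", "lancet", "jama"]
  if tier1.any (fun j => PySem.Str.isIn j journal_lower) then 1
  else
    let tier2 := ["nature communications", "cell reports", "pnas", "plos biology",
                  "elife", "current biology", "molecular cell", "neuron"]
    if tier2.any (fun j => PySem.Str.isIn j journal_lower) then 2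
    else
      let tier3 := ["plos one", "scientific reports", "frontiers", "bmc",
                    "journal of biological chemistry", "biochemistry"]
      if tier3.any (fun j => PySem.Str.isIn j journal_lower) then 3
      else 3

-- ===== PORT B =====
-- the flat keyword table (module-level KEYWORDS in Source B)
def pvKeywords : List (String × Int) :=
  [("nature", 1), ("science", 1), ("cell", 1), ("nejm", 1), ("lancet", 1), ("jama", 1),
   ("nature communications", 2), ("cell reports", 2), ("pnas", 2), ("plos biology", 2),
   ("elife", 2), ("current biology", 2), ("molecular cell", 2), ("neuron", 2),
   ("plos one", 3), ("scientific reports", 3), ("frontiers", 3), ("bmc", 3),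
   ("journal of biological chemistry", 3), ("biochemistry", 3)]

def estimate_journal_tier_py_alt (journal_name : String) : Int :=
  let jl := PySem.Str.lower journal_name
  let matched := pvKeywords.filterMap (fun st => if PySem.Str.isIn st.1 jl then some st.2 else none)
  -- 'min(matched) if matched else 3'
  match PySem.List.min? matched (fun x => x) with
  | some m => m
  | none => 3

-- ===== PRECONDITION & SPEC =====
def Spec_estimate_journal_tier_py (journal_name : String) (out : Int) : Prop := out = estimate_journal_tier_py_alt journal_name
instance (journal_name : String) (out : Int) : Decidable (Spec_estimate_journal_tier_py journal_name out) := by unfold Spec_estimate_journal_tier_py; infer_instance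

-- ===== CLAIM =====
def Claim_equal_estimate_journal_tier_py : Prop := ∀ (journal_name : String), Dom_estimate_journal_tier_py journal_name → Spec_estimate_journal_tier_py journal_name (estimate_journal_tier_py journal_name)

-- ===== LEMMAS AND PROOFS =====

-- the keyword table is the three tier lists tagged with their constant tier value
lemma pvKeywords_eq :
    pvKeywords =
      (["nature", "science", "cell", "nejm", "lancet", "jama"]).map (fun s => (s, (1:Int))) ++
      (["nature communications", "cell reports", "pnas", "plos biology",
        "elife", "current biology", "molecular cell", "neuron"]).map (fun s => (s, (2:Int))) ++
      (["plos one", "scientific reports", "frontiers", "bmc",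
        "journal of biological chemistry", "biochemistry"]).map (fun s => (s, (3:Int))) := rfl

-- filtering a constant-tagged segment yields a replicate of the tag
lemma filterMap_const_tag (p : String → Bool) (c : Int) (l : List String) :
    (l.map (fun s => (s, c))).filterMap
        (fun st => if p st.1 then some st.2 else none)
      = List.replicate (l.countP p) c := by
  induction l with
  | nil => rfl
  | cons s t ih =>
      by_cases h : p s <;>
        simp [h, ih, List.replicate_succ]

lemma foldl_min_all_ge (t : List Int) (c : Int) (h : ∀ y ∈ t, c ≤ y) :
    t.foldl min c = c := by
  induction t generalizing c with
  | nil => rfl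
  | cons y t ih =>
      have hy : c ≤ y := h y (by simp)
      simp only [List.foldl_cons, min_eq_left hy]
      exact ih c (fun z hz => h z (by simp [hz]))

-- min-with-default over the three replicated segments
lemma min_replicates (n1 n2 n3 : Nat) :
    (match PySem.List.min?
        (List.replicate n1 (1:Int) ++ List.replicate n2 2 ++ List.replicate n3 3)
        (fun x => x) with
      | some m => m | none => 3)
    = if n1 ≠ 0 then 1 else if n2 ≠ 0 then 2 else (3:Int) := by
  cases n1 with
  | succ k =>
      simp only [List.replicate_succ, List.cons_append, PySem.List.min?_id_cons]
      have : ∀ y ∈ (List.replicate k (1:Int) ++ List.replicate n2 2 ++ List.replicate n3 3),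
          (1:Int) ≤ y := by
        intro y hy
        rcases List.mem_append.1 hy with hy | hy
        · rcases List.mem_append.1 hy with hy | hy
          · simp [List.eq_of_mem_replicate hy]
          · simp [List.eq_of_mem_replicate hy]
        · simp [List.eq_of_mem_replicate hy]
      rw [foldl_min_all_ge _ _ this]
      simp
  | zero =>
      cases n2 with
      | succ k =>
          simp only [List.replicate_zero, List.nil_append, List.replicate_succ,
            List.cons_append, PySem.List.min?_id_cons]
          have : ∀ y ∈ (List.replicate k (2:Int) ++ List.replicate n3 3), (2:Int) ≤ y := by
            intro y hy
            rcases List.mem_append.1 hy with hy | hy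
            · simp [List.eq_of_mem_replicate hy]
            · simp [List.eq_of_mem_replicate hy]
          rw [foldl_min_all_ge _ _ this]
          simp
      | zero =>
          cases n3 with
          | succ k =>
              simp only [List.replicate_zero, List.nil_append, List.replicate_succ,
                PySem.List.min?_id_cons]
              have : ∀ y ∈ List.replicate k (3:Int), (3:Int) ≤ y := by
                intro y hy; simp [List.eq_of_mem_replicate hy]
              rw [foldl_min_all_ge _ _ this]
              simp
          | zero =>
              have : PySem.List.min? ([] : List Int) (fun x => x) = none :=
                (PySem.List.min?_eq_none_iff _ _).2 rfl
              simp [this]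

lemma any_eq_countP_ne (p : String → Bool) (l : List String) :
    l.any p = decide (l.countP p ≠ 0) := by
  induction l with
  | nil => rfl
  | cons s t ih => by_cases h : p s <;> simp [h, ih]

-- ===== VERDICT =====
theorem estimate_journal_tier_py_spec : Claim_equal_estimate_journal_tier_py := by
  intro journal_name _
  unfold Spec_estimate_journal_tier_py estimate_journal_tier_py estimate_journal_tier_py_alt
  set jl := PySem.Str.lower journal_name with hjl
  set p : String → Bool := fun s => PySem.Str.isIn s jl with hp
  have hfm : pvKeywords.filterMap (fun st => if PySem.Str.isIn st.1 jl then some st.2 else none)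
      = List.replicate ((["nature", "science", "cell", "nejm", "lancet", "jama"]).countP p) (1:Int)
        ++ List.replicate ((["nature communications", "cell reports", "pnas", "plos biology",
              "elife", "current biology", "molecular cell", "neuron"]).countP p) 2
        ++ List.replicate ((["plos one", "scientific reports", "frontiers", "bmc",
              "journal of biological chemistry", "biochemistry"]).countP p) 3 := by
    rw [pvKeywords_eq, List.filterMap_append, List.filterMap_append,
      filterMap_const_tag p 1, filterMap_const_tag p 2, filterMap_const_tag p 3]
  simp only [hfm, min_replicates, any_eq_countP_ne]
  split_ifs <;> simp_all
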